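-- pv_equiv track=rewrite | github.com/howard1005/LeetCode | 2389-longest-subsequence-with-limited-sum/2389-longest-subsequence-with-limited-sum.py | answerQueries
-- ===== SOURCE A (Python) =====
-- from typing import List
--
-- from bisect import bisect_right
--
-- def answerQueries(nums: List[int], queries: List[int]) -> List[int]:
--     ans = []
--
--     nums.sort()
--     for i in range(1,len(nums)):
--         nums[i] += nums[i-1]
--     for q in queries:
--         ans.append(bisect_right(nums,q))
--
--     return ans
-- ===== SOURCE B (Python) =====
-- from typing import List
--
--
-- def answerQueries(nums: List[int], queries: List[int]) -> List[int]:
--     # Divide and conquer per query: recurse on the sorted values themselves,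
--     # carrying the running sum of the part already taken, instead of
--     # materialising a prefix-sum array and calling bisect_right on it.
--     # (Sorts nums in place like A, but does not overwrite it with prefix sums.)
--     nums.sort()
--     return [_rank(q, nums, 0) for q in queries]
--
--
-- def _rank(q: int, xs: List[int], base: int) -> int:
--     if not xs:
--         return 0
--     mid = len(xs) // 2
--     pivot = base + sum(xs[:mid + 1])
--     if q < pivot:
--         return _rank(q, xs[:mid], base)
--     return mid + 1 + _rank(q, xs[mid + 1:], pivot)
-- ===== Notes on version B (the rewrite author's own statement) =====
-- stated objective: alternative
-- what changed: B drops A's materialised prefix-sum array and bisect_right call: it answers each query by a recursive divide-and-conquer directly on the sorted values, carrying the running sum of the part already taken, and builds the result with a comprehension instead of an append loop.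
import Mathlib
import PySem

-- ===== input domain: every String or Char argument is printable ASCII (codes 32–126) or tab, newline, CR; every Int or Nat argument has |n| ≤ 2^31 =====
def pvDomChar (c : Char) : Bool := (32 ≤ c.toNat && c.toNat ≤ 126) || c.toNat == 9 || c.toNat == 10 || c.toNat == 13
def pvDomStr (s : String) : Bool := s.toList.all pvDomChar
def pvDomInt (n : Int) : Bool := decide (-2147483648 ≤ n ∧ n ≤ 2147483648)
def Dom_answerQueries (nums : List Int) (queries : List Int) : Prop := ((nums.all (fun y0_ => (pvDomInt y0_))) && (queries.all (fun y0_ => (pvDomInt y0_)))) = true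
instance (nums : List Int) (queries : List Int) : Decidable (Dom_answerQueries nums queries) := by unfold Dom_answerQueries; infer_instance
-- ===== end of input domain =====

-- B replaces A's prefix-sum array + bisect_right per query by a divide-and-conquer
-- recursion on the sorted values that carries the running sum of the part already
-- taken (no prefix array, no bisect); not faster. Both Pythons sort nums in place;
-- A additionally overwrites nums with its prefix sums, B does not — the equivalence
-- proved here is about the return value only.

-- ===== PORT A =====
def answerQueries (nums : List Int) (queries : List Int) : List Int :=
  -- nums.sort()
  let s := PySem.List.sorted nums (fun x => x)
  -- for i in range(1, len(nums)): nums[i] += nums[i-1]   (indices i ≥ 1 are in range)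
  let p := (PySem.List.pyRange 1 (s.length : Int)).foldl
    (fun l i => PySem.List.pySetD l i (PySem.List.pyGetD l i 0 + PySem.List.pyGetD l (i - 1) 0)) s
  -- for q in queries: ans.append(bisect_right(nums, q))
  queries.foldl (fun ans q => ans ++ [((PySem.List.bisectRight p q : Nat) : Int)]) []

-- ===== PORT B =====
-- _rank(q, xs, base): divide and conquer on the sorted chunk xs, base = sum of
-- the elements already taken to the left of xs
def rankB (q : Int) : List Int → Int → Nat
  | [], _ => 0
  | x :: r, base =>
    let mid := (x :: r).length / 2
    let pivot := base + ((x :: r).take (mid + 1)).sum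
    if q < pivot then rankB q ((x :: r).take mid) base
    else (mid + 1) + rankB q ((x :: r).drop (mid + 1)) pivot
termination_by l _ => l.length
decreasing_by
  · simp; omega
  · simp

def answerQueries_alt (nums : List Int) (queries : List Int) : List Int :=
  let s := PySem.List.sorted nums (fun x => x)
  queries.map (fun q => ((rankB q s 0 : Nat) : Int))

-- ===== PRECONDITION & SPEC =====
def Spec_answerQueries (nums : List Int) (queries : List Int) (out : List Int) : Prop :=
  out = answerQueries_alt nums queries
instance (nums : List Int) (queries : List Int) (out : List Int) : Decidable (Spec_answerQueries nums queries out) := by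
  unfold Spec_answerQueries; infer_instance

-- ===== CLAIM (what is proved, stated in full; the proofs are below) =====
def Claim_equal_answerQueries : Prop := ∀ (nums : List Int) (queries : List Int),
  Dom_answerQueries nums queries → Spec_answerQueries nums queries (answerQueries nums queries)

-- ===== LEMMAS AND PROOFS =====

-- reference prefix-sum list: pfx t [x1,…,xn] = [t+x1, t+x1+x2, …]
def pfx : Int → List Int → List Int
  | _, [] => []
  | t, x :: r => (t + x) :: pfx (t + x) r

theorem pfx_length (t : Int) (l : List Int) : (pfx t l).length = l.length := by
  induction l generalizing t with
  | nil => rfl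
  | cons x r ih => simp [pfx, ih]

theorem pfx_append (t : Int) (l l' : List Int) :
    pfx t (l ++ l') = pfx t l ++ pfx (t + l.sum) l' := by
  induction l generalizing t with
  | nil => simp [pfx]
  | cons x r ih => simp [pfx, ih, add_assoc]

theorem pfx_getD_last (t : Int) (l : List Int) (h : l ≠ []) :
    (pfx t l).getD (l.length - 1) 0 = t + l.sum := by
  induction l generalizing t with
  | nil => simp at h
  | cons x r ih =>
    cases r with
    | nil => simp [pfx]
    | cons y r' =>
      have := ih (t := t + x) (by simp)
      simpa [pfx, add_assoc] using this

theorem pfx_getElem? (l : List Int) (t : Int) (k : Nat) (hk : k < l.length) :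
    (pfx t l)[k]? = some (t + (l.take (k + 1)).sum) := by
  induction l generalizing t k with
  | nil => simp at hk
  | cons x r ih =>
    cases k with
    | zero => simp [pfx]
    | succ k =>
      have := ih (t := t + x) (k := k) (by simpa using hk)
      simpa [pfx, add_assoc] using this

theorem getD_append_lt (A B : List Int) (k : Nat) (d : Int) (h : k < A.length) :
    (A ++ B).getD k d = A.getD k d := by
  induction A generalizing k with
  | nil => simp at h
  | cons a A ih =>
    cases k with
    | zero => simp
    | succ k => simpa using ih k (by simpa using h)

theorem getD_append_len (A : List Int) (b : Int) (C : List Int) (d : Int) :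
    (A ++ b :: C).getD A.length d = b := by
  induction A with
  | nil => simp
  | cons a A ih => simpa using ih

theorem set_append_len (A : List Int) (b v : Int) (C : List Int) :
    (A ++ b :: C).set A.length v = A ++ v :: C := by
  induction A with
  | nil => simp
  | cons a A ih => simpa using ih

-- A's in-place prefix loop after processing range(1, m) (invariant of the loop)
theorem loop_take (s : List Int) (m : Nat) (hm : m ≤ s.length) :
    (PySem.List.pyRange 1 (m : Int)).foldl
      (fun l i => PySem.List.pySetD l i (PySem.List.pyGetD l i 0 + PySem.List.pyGetD l (i - 1) 0)) s
    = pfx 0 (s.take m) ++ s.drop m := by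
  induction m with
  | zero =>
    rw [PySem.List.pyRange_one_eq_nil (by norm_num)]
    simp [pfx]
  | succ m ih =>
    rcases Nat.eq_zero_or_pos m with rfl | hpos
    · rw [PySem.List.pyRange_one_eq_nil (by norm_num)]
      cases s with
      | nil => simp at hm
      | cons x r => simp [pfx]
    · have hm' : m ≤ s.length := by omega
      have hms : m < s.length := by omega
      have hA : (pfx 0 (s.take m)).length = m := by
        rw [pfx_length]; simp [hms.le]
      have hdrop : s.drop m = s[m] :: s.drop (m + 1) := List.drop_eq_getElem_cons hms
      rw [show ((m + 1 : Nat) : Int) = (m : Int) + 1 by push_cast; ring,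
        PySem.List.pyRange_one_succ_right (by exact_mod_cast hpos), List.foldl_append, ih hm']
      simp only [List.foldl_cons, List.foldl_nil]
      have hc1 : PySem.List.pyGetD (pfx 0 (s.take m) ++ s.drop m) (m : Int) 0
          = s[m] := by
        rw [PySem.List.pyGetD_natCast, hdrop]
        have := getD_append_len (pfx 0 (s.take m)) s[m] (s.drop (m + 1)) 0
        rwa [hA] at this
      have hc2 : PySem.List.pyGetD (pfx 0 (s.take m) ++ s.drop m) ((m : Int) - 1) 0
          = (s.take m).sum := by
        have hcast : ((m : Int) - 1) = ((m - 1 : Nat) : Int) := by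
          push_cast [Nat.cast_sub hpos]; ring
        rw [hcast, PySem.List.pyGetD_natCast,
          getD_append_lt _ _ _ _ (by rw [hA]; omega)]
        have hne : s.take m ≠ [] := by
          intro hcon
          have := congrArg List.length hcon
          simp [hms.le] at this
          omega
        have hlast := pfx_getD_last 0 (s.take m) hne
        rw [show (s.take m).length = m by simp [hms.le]] at hlast
        rw [hlast]
        ring
      have hset : (pfx 0 (s.take m) ++ s[m] :: s.drop (m + 1)).set m (s[m] + (s.take m).sum)
          = pfx 0 (s.take m) ++ (s[m] + (s.take m).sum) :: s.drop (m + 1) := by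
        have := set_append_len (pfx 0 (s.take m)) s[m] (s[m] + (s.take m).sum) (s.drop (m + 1))
        rwa [hA] at this
      have htake : s.take (m + 1) = s.take m ++ [s[m]] := by
        rw [List.take_succ]
        simp [List.getElem?_eq_getElem hms]
      rw [hc1, hc2, PySem.List.pySetD_natCast, hdrop, hset, htake, pfx_append]
      simp [pfx]
      ring

-- A's in-place prefix loop computes pfx 0 s
theorem loop_eq_pfx (s : List Int) :
    (PySem.List.pyRange 1 (s.length : Int)).foldl
      (fun l i => PySem.List.pySetD l i (PySem.List.pyGetD l i 0 + PySem.List.pyGetD l (i - 1) 0)) s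
    = pfx 0 s := by
  simpa using loop_take s s.length le_rfl

-- the bisect loop over a window of P equals rankB on the chunk of values whose
-- prefix sums fill that window (no sortedness needed: the same midpoints are probed)
theorem bisect_loop_eq_rank (q : Int) (P : List Int) :
    ∀ (fuel : Nat) (chunk : List Int) (base : Int) (lo : Nat),
      chunk.length ≤ fuel →
      (∀ k, k < chunk.length → P[lo + k]? = some (base + (chunk.take (k + 1)).sum)) →
      PySem.List.bisectRightLoop P q fuel lo (lo + chunk.length) = lo + rankB q chunk base := by
  intro fuel
  induction fuel with
  | zero =>
    intro chunk base lo hf _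
    have : chunk = [] := List.length_eq_zero_iff.mp (by omega)
    subst this
    simp [PySem.List.bisectRightLoop, rankB]
  | succ fuel ih =>
    intro chunk base lo hf hidx
    cases chunk with
    | nil => simp [PySem.List.bisectRightLoop, rankB]
    | cons x r =>
      have hn0 : 0 < (x :: r).length := by simp
      have hlt : lo < lo + (x :: r).length := by omega
      have hmid : (lo + (lo + (x :: r).length)) / 2 = lo + (x :: r).length / 2 := by omega
      have hmidn : (x :: r).length / 2 < (x :: r).length := by omega
      have hPmid : P[lo + (x :: r).length / 2]?
          = some (base + ((x :: r).take ((x :: r).length / 2 + 1)).sum) := hidx _ hmidn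
      rw [PySem.List.bisectRightLoop]
      simp only [hlt, if_pos, hmid, hPmid]
      rw [rankB]
      by_cases hq : q < base + ((x :: r).take ((x :: r).length / 2 + 1)).sum
      · simp only [hq, if_pos]
        have hlen' : ((x :: r).take ((x :: r).length / 2)).length = (x :: r).length / 2 := by
          simp; omega
        have hrec := ih ((x :: r).take ((x :: r).length / 2)) base lo
          (by rw [hlen']; omega)
          (by
            intro k hk
            rw [hlen'] at hk
            have hh := hidx k (by omega)
            rw [List.take_take, Nat.min_eq_left (by omega)]
            exact hh)
        rw [hlen'] at hrec
        exact hrec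
      · simp only [hq, if_neg, if_false]
        have hlen' : ((x :: r).drop ((x :: r).length / 2 + 1)).length
            = (x :: r).length - ((x :: r).length / 2 + 1) := by
          simp
        have hrec := ih ((x :: r).drop ((x :: r).length / 2 + 1))
          (base + ((x :: r).take ((x :: r).length / 2 + 1)).sum)
          (lo + (x :: r).length / 2 + 1)
          (by rw [hlen']; omega)
          (by
            intro k hk
            rw [hlen'] at hk
            have h1 := hidx ((x :: r).length / 2 + 1 + k) (by omega)
            have h2 : (x :: r).take ((x :: r).length / 2 + 1 + k + 1)
                = (x :: r).take ((x :: r).length / 2 + 1)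
                  ++ ((x :: r).drop ((x :: r).length / 2 + 1)).take (k + 1) := by
              rw [show (x :: r).length / 2 + 1 + k + 1
                  = ((x :: r).length / 2 + 1) + (k + 1) by omega, ← List.take_add]
            rw [show lo + (x :: r).length / 2 + 1 + k
                = lo + ((x :: r).length / 2 + 1 + k) by omega, h1, h2]
            simp [add_assoc])
        rw [hlen'] at hrec
        rw [show lo + (x :: r).length
            = (lo + (x :: r).length / 2 + 1) + ((x :: r).length - ((x :: r).length / 2 + 1))
            by omega, hrec]
        omega

theorem bisectRight_eq_rank (s : List Int) (q : Int) :
    PySem.List.bisectRight (pfx 0 s) q = rankB q s 0 := by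
  have h := bisect_loop_eq_rank q (pfx 0 s) s.length s 0 0 le_rfl
    (fun k hk => by simpa using pfx_getElem? s 0 k hk)
  simpa [PySem.List.bisectRight, pfx_length] using h

-- ===== VERDICT (by name: the statement is the Claim_ definition above) =====
theorem answerQueries_spec : Claim_equal_answerQueries := by
  intro nums queries _
  unfold Spec_answerQueries
  simp only [answerQueries, answerQueries_alt]
  rw [loop_eq_pfx, PySem.List.foldl_append_singleton_eq_map]
  simp only [List.nil_append]
  apply List.map_congr_left
  intro q _
  rw [bisectRight_eq_rank]
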